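-- pv_equiv track=rewrite | github.com/matxa/holbertonschool-interview | 0x13-count_it/0-count.py | lookup_recursively
-- ===== SOURCE A (Python) =====
-- def lookup_recursively(data, data_index, word, word_count=0):
--     """ Lookup recursively count words
--     """
--     data_len = len(data)
--     if data_index < data_len:
--         count_words = data[data_index]['data']['title'].count(word)
--         word_count += count_words
--         return lookup_recursively(data, data_index + 1, word, word_count)
--     else:
--         return word_count
-- ===== SOURCE B (Python) =====
-- def lookup_recursively(data, data_index, word, word_count=0):
--     """ Lookup recursively count words
--     """
--     return word_count + sum(data[i]['data']['title'].count(word)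
--                             for i in range(data_index, len(data)))
-- ===== Notes on version B (the rewrite author's own statement) =====
-- stated objective: simpler
-- what changed: Replaces the tail recursion with index bookkeeping by a single sum over range(data_index, len(data)), with no recursive calls or accumulator threading.
import Mathlib
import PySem

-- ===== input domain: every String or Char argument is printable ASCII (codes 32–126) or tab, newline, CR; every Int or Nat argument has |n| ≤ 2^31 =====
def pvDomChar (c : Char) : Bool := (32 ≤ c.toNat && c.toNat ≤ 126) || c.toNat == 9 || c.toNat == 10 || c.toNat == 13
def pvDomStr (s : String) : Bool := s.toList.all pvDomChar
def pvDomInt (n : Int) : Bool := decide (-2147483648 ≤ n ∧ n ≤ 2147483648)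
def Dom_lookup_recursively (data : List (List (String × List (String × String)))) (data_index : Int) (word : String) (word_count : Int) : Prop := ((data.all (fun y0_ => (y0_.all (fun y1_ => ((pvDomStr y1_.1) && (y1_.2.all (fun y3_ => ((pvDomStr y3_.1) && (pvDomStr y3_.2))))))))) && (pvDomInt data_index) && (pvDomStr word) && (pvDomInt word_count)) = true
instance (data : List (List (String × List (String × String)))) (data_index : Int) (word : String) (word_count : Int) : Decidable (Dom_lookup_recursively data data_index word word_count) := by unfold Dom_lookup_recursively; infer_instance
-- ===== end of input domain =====

-- B replaces A's tail recursion by a single sum over range(data_index, len(data)) (objective: simpler).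

-- ===== PORT A =====
-- data[i]['data']['title'] is ported with the total forms pyGetD / Dict.getD; Pre_ excludes
-- exactly the inputs where Python raises (IndexError / KeyError), so the defaults are never used.
-- dict[k] on an association list: first-match lookup (List.lookup); exact for Python dicts
-- (unique keys), with Pre_ guaranteeing the key is present so the getD default is never used.
def pvTitle (data : List (List (String × List (String × String)))) (i : Int) : String :=
  ((((PySem.List.pyGetD data i []).lookup "data").getD []).lookup "title").getD ""

def lookup_recursively (data : List (List (String × List (String × String)))) (data_index : Int) (word : String) (word_count : Int) : Int :=
  if _h : data_index < (data.length : Int) then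
    let count_words : Int := PySem.Str.count (pvTitle data data_index) word
    lookup_recursively data (data_index + 1) word (word_count + count_words)
  else
    word_count
termination_by ((data.length : Int) - data_index).toNat
decreasing_by omega

-- ===== PORT B =====
def lookup_recursively_alt (data : List (List (String × List (String × String)))) (data_index : Int) (word : String) (word_count : Int) : Int :=
  word_count +
    ((PySem.List.pyRange data_index (data.length : Int) 1).map
      (fun i => (PySem.Str.count (pvTitle data i) word : Int))).sum

-- ===== PRECONDITION & SPEC =====
-- Pre_ excludes exactly the inputs where the Python A raises: a start index below -len(data)
-- (IndexError on the first access) and visited entries missing the 'data' or 'title' key (KeyError).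
def pvHasTitle (e : List (String × List (String × String))) : Prop :=
  ((e.lookup "data").bind (fun d => d.lookup "title")).isSome = true

def Pre_lookup_recursively (data : List (List (String × List (String × String)))) (data_index : Int) (word : String) (word_count : Int) : Prop :=
  if data_index < 0 then
    -(data.length : Int) ≤ data_index ∧ ∀ e ∈ data, pvHasTitle e
  else
    ∀ e ∈ data.drop data_index.toNat, pvHasTitle e

instance (data : List (List (String × List (String × String)))) (data_index : Int) (word : String) (word_count : Int) : Decidable (Pre_lookup_recursively data data_index word word_count) := by
  unfold Pre_lookup_recursively pvHasTitle; infer_instance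

def pvWitness_lookup_recursively : (List (List (String × List (String × String)))) × Int × String × Int :=
  ([[("data", [("title", "hello world hello")])]], 0, "hello", 0)

def Spec_lookup_recursively (data : List (List (String × List (String × String)))) (data_index : Int) (word : String) (word_count : Int) (out : Int) : Prop := out = lookup_recursively_alt data data_index word word_count
instance (data : List (List (String × List (String × String)))) (data_index : Int) (word : String) (word_count : Int) (out : Int) : Decidable (Spec_lookup_recursively data data_index word word_count out) := by unfold Spec_lookup_recursively; infer_instance

-- ===== CLAIM (what is proved, stated in full; the proofs are below) =====
def Claim_equal_lookup_recursively : Prop := ∀ (data : List (List (String × List (String × String)))) (data_index : Int) (word : String) (word_count : Int), Dom_lookup_recursively data data_index word word_count → Pre_lookup_recursively data data_index word word_count → Spec_lookup_recursively data data_index word word_count (lookup_recursively data data_index word word_count)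

-- ===== LEMMAS AND PROOFS =====
theorem lookup_eq_add_sum (data : List (List (String × List (String × String)))) (word : String) :
    ∀ (n : Nat) (data_index word_count : Int), ((data.length : Int) - data_index).toNat = n →
      lookup_recursively data data_index word word_count =
        word_count + ((PySem.List.pyRange data_index (data.length : Int) 1).map
          (fun i => (PySem.Str.count (pvTitle data i) word : Int))).sum := by
  intro n
  induction n with
  | zero =>
    intro di wc h
    have hge : (data.length : Int) ≤ di := by omega
    rw [lookup_recursively.eq_def, PySem.List.pyRange_one_eq_nil hge]
    simp; omega
  | succ n ih =>
    intro di wc h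
    by_cases hlt : di < (data.length : Int)
    · rw [lookup_recursively.eq_def, PySem.List.pyRange_one_cons hlt]
      simp only [hlt, dif_pos, List.map_cons, List.sum_cons]
      rw [ih (di + 1) _ (by omega)]
      ring
    · rw [lookup_recursively.eq_def, PySem.List.pyRange_one_eq_nil (by omega)]
      simp [hlt]

-- ===== VERDICT (by name: the statement is the Claim_ definition above) =====
theorem lookup_recursively_spec : Claim_equal_lookup_recursively := by
  intro data data_index word word_count _ _
  unfold Spec_lookup_recursively lookup_recursively_alt
  exact lookup_eq_add_sum data word _ data_index word_count rfl
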